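-- pv_equiv track=rewrite | github.com/Alvannwanorim/DSA-Python | Bloomberg/check_if_one_string_swap_can_make_strings_equal.py | stringSwap
-- ===== SOURCE A (Python) =====
-- def stringSwap(s1: str, s2: str) -> bool:
--     if s1 == s2:
--         return True
--     if len(s1) != len(s2):
--         return False
--
--     if sorted(s1) != sorted(s2):
--         return False
--
--     count = 0
--
--     for x,y in zip(s1,s2):
--         if x != y:
--             count += 1
--
--     return count == 2
-- ===== SOURCE B (Python) =====
-- def stringSwap(s1: str, s2: str) -> bool:
--     if len(s1) != len(s2):
--         return False
--     diffs = [(x, y) for x, y in zip(s1, s2) if x != y]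
--     if not diffs:
--         return True
--     if len(diffs) != 2:
--         return False
--     (a, b), (c, d) = diffs
--     return a == d and b == c
-- ===== Notes on version B (the rewrite author's own statement) =====
-- stated objective: faster
-- what changed: B drops the two O(n log n) sorts entirely: one pass collects the mismatched character pairs (early lists), equality holds iff there are none or exactly two cross-matching pairs.
import Mathlib
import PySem

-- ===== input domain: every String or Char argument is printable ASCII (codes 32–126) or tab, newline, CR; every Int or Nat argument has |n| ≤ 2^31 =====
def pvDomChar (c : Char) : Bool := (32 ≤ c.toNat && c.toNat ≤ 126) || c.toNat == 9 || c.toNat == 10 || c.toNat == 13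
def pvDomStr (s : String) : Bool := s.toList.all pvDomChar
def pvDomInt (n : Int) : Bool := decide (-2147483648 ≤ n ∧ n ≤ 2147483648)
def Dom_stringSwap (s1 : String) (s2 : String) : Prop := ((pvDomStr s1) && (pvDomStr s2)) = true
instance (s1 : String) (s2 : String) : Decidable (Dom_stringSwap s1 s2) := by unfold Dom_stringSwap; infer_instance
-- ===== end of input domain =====

-- B replaces A's two sorts by a single pass over the mismatched character pairs (objective: faster, O(n) vs O(n log n)).

-- ===== PORT A =====
def stringSwap (s1 : String) (s2 : String) : Bool :=
  if s1 == s2 then true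
  else if s1.toList.length != s2.toList.length then false
  else if PySem.List.sorted s1.toList (fun x => x) false != PySem.List.sorted s2.toList (fun x => x) false then false
  else
    let count : Int :=
      (s1.toList.zip s2.toList).foldl (fun c p => if p.1 != p.2 then c + 1 else c) 0
    count == 2

-- ===== PORT B =====
def stringSwap_alt (s1 : String) (s2 : String) : Bool :=
  if s1.toList.length != s2.toList.length then false
  else
    match (s1.toList.zip s2.toList).filter (fun p => p.1 != p.2) with
    | [] => true
    | [(a, b), (c, d)] => a == d && b == c
    | _ => false

-- ===== PRECONDITION & SPEC =====
def Spec_stringSwap (s1 : String) (s2 : String) (out : Bool) : Prop := out = stringSwap_alt s1 s2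
instance (s1 : String) (s2 : String) (out : Bool) : Decidable (Spec_stringSwap s1 s2 out) := by unfold Spec_stringSwap; infer_instance

-- ===== CLAIM (what is proved, stated in full; the proofs are below) =====
def Claim_equal_stringSwap : Prop := ∀ (s1 : String) (s2 : String), Dom_stringSwap s1 s2 → Spec_stringSwap s1 s2 (stringSwap s1 s2)

-- ===== LEMMAS AND PROOFS =====

-- A's loop counts exactly the length of B's filtered mismatch list.
theorem pvCount_eq_filterLen (ps : List (Char × Char)) : ∀ (c : Int),
    ps.foldl (fun c p => if p.1 != p.2 then c + 1 else c) c
      = c + ((ps.filter (fun p => p.1 != p.2)).length : Int) := by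
  induction ps with
  | nil => intro c; simp
  | cons p t ih =>
    intro c
    by_cases h : p.1 = p.2
    · have hb : (p.1 != p.2) = false := by simp [h]
      simp only [List.foldl_cons, List.filter_cons, hb, Bool.false_eq_true, if_false]
      exact ih c
    · have hb : (p.1 != p.2) = true := by simp [h]
      simp only [List.foldl_cons, List.filter_cons, hb, if_true]
      rw [ih (c + 1)]
      simp only [List.length_cons]
      push_cast
      ring

-- no mismatches ↔ the lists are equal (given equal length)
theorem pvFilter_nil_iff : ∀ (l1 l2 : List Char), l1.length = l2.length →
    ((l1.zip l2).filter (fun p => p.1 != p.2) = [] ↔ l1 = l2) := by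
  intro l1
  induction l1 with
  | nil => intro l2 h; cases l2 <;> simp_all
  | cons a t ih =>
    intro l2 h
    cases l2 with
    | nil => simp at h
    | cons b u =>
      simp only [List.length_cons, Nat.add_right_cancel_iff] at h
      by_cases hab : a = b
      · subst hab
        rw [List.zip_cons_cons, List.filter_cons]
        simp only [bne_self_eq_false, Bool.false_eq_true, if_false, List.cons.injEq, true_and]
        exact ih u h
      · have hb : (((a, b) : Char × Char).1 != (a, b).2) = true := by simp [hab]
        rw [List.zip_cons_cons, List.filter_cons, hb]
        simp [hab]

-- multiset bookkeeping: each position contributes equal chars or one mismatched pair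
theorem pvMultiset_sum : ∀ (l1 l2 : List Char), l1.length = l2.length →
    (l1 : Multiset Char) + ((((l1.zip l2).filter (fun p => p.1 != p.2)).map Prod.snd : List Char) : Multiset Char)
      = (l2 : Multiset Char) + ((((l1.zip l2).filter (fun p => p.1 != p.2)).map Prod.fst : List Char) : Multiset Char) := by
  intro l1
  induction l1 with
  | nil => intro l2 h; cases l2 <;> simp_all
  | cons a t ih =>
    intro l2 h
    cases l2 with
    | nil => simp at h
    | cons b u =>
      simp only [List.length_cons, Nat.add_right_cancel_iff] at h
      by_cases hab : a = b
      · subst hab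
        rw [List.zip_cons_cons, List.filter_cons]
        simp only [bne_self_eq_false, Bool.false_eq_true, if_false, ← Multiset.cons_coe,
          Multiset.cons_add]
        rw [ih u h]
      · have hb : (((a, b) : Char × Char).1 != (a, b).2) = true := by simp [hab]
        rw [List.zip_cons_cons, List.filter_cons, hb]
        simp only [if_true, List.map_cons, ← Multiset.cons_coe, Multiset.cons_add,
          Multiset.add_cons]
        rw [ih u h]
        exact Multiset.cons_swap b a _

-- perm of the full lists ↔ perm of the mismatched columns
theorem pvPerm_iff (l1 l2 : List Char) (h : l1.length = l2.length) :
    l1.Perm l2 ↔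
      ((((l1.zip l2).filter (fun p => p.1 != p.2)).map Prod.snd : List Char) : Multiset Char)
        = ((((l1.zip l2).filter (fun p => p.1 != p.2)).map Prod.fst : List Char) : Multiset Char) := by
  have hsum := pvMultiset_sum l1 l2 h
  constructor
  · intro hp
    have : (l1 : Multiset Char) = (l2 : Multiset Char) := Multiset.coe_eq_coe.mpr hp
    rw [this] at hsum
    exact add_left_cancel hsum
  · intro he
    rw [he] at hsum
    have := add_right_cancel hsum
    exact Multiset.coe_eq_coe.mp this

theorem pvPair_multiset {b e a c : Char} (hab : a ≠ b) (hce : c ≠ e) :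
    ((b ::ₘ e ::ₘ 0 : Multiset Char) = a ::ₘ c ::ₘ 0) ↔ (a = e ∧ b = c) := by
  constructor
  · intro h
    have hmem : a ∈ (b ::ₘ e ::ₘ (0 : Multiset Char)) := by rw [h]; simp
    simp only [Multiset.mem_cons, Multiset.notMem_zero, or_false] at hmem
    rcases hmem with hba | hea
    · exact absurd hba hab
    · subst hea
      rw [Multiset.cons_swap] at h
      have := Multiset.cons_inj_right (a := a) |>.mp h
      have hbc : b ∈ (c ::ₘ (0 : Multiset Char)) := by rw [← this]; simp
      simp only [Multiset.mem_cons, Multiset.notMem_zero, or_false] at hbc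
      exact ⟨rfl, hbc⟩
  · rintro ⟨rfl, rfl⟩
    exact Multiset.cons_swap b a 0


theorem pvMem_filter_zip_ne {l1 l2 : List Char} {p : Char × Char}
    (hp : p ∈ (l1.zip l2).filter (fun p => p.1 != p.2)) : p.1 ≠ p.2 := by
  have := List.of_mem_filter hp
  simpa using this

-- ===== VERDICT (by name: the statement is the Claim_ definition above) =====
theorem stringSwap_spec : Claim_equal_stringSwap := by
  intro s1 s2 _
  unfold Spec_stringSwap stringSwap stringSwap_alt
  by_cases heq : s1 = s2
  · subst heq
    have hf : (s1.toList.zip s1.toList).filter (fun p => p.1 != p.2) = [] :=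
      (pvFilter_nil_iff s1.toList s1.toList rfl).mpr rfl
    simp [hf]
  · have hbeq : (s1 == s2) = false := by simp [heq]
    rw [hbeq]
    simp only [Bool.false_eq_true, if_false]
    by_cases hlen : s1.toList.length = s2.toList.length
    · have hlb : (s1.toList.length != s2.toList.length) = false := by
        simp only [bne_eq_false_iff_eq]; exact hlen
      rw [hlb]
      simp only [Bool.false_eq_true, if_false]
      have hne : s1.toList ≠ s2.toList := fun h => heq (String.toList_inj.mp h)
      have hdne := (not_iff_not.mpr (pvFilter_nil_iff s1.toList s2.toList hlen)).mpr hne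
      have hperm := pvPerm_iff s1.toList s2.toList hlen
      have hsorted : ((PySem.List.sorted s1.toList (fun x => x) false
            = PySem.List.sorted s2.toList (fun x => x) false)) ↔ s1.toList.Perm s2.toList :=
        PySem.List.sorted_id_eq_sorted_id_iff_perm s1.toList s2.toList
      rw [show ((s1.toList.zip s2.toList).foldl
            (fun c p => if p.1 != p.2 then c + 1 else c) (0 : Int))
          = 0 + (((s1.toList.zip s2.toList).filter (fun p => p.1 != p.2)).length : Int)
        from pvCount_eq_filterLen _ 0]
      cases hdm : (s1.toList.zip s2.toList).filter (fun p => p.1 != p.2) with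
      | nil => exact absurd hdm hdne
      | cons p d1 =>
        obtain ⟨a, b⟩ := p
        have hab : a ≠ b := pvMem_filter_zip_ne (p := (a, b)) (by rw [hdm]; simp)
        rw [hdm] at hperm hdne
        cases d1 with
        | nil =>
          -- one mismatch: not a permutation, both sides false
          have hnp : ¬ s1.toList.Perm s2.toList := by
            intro hp
            have := hperm.mp hp
            simp only [List.map_cons, List.map_nil, Multiset.coe_singleton,
              Multiset.singleton_inj] at this
            exact hab this.symm
          have hs : ((PySem.List.sorted s1.toList (fun x => x) false)
              != (PySem.List.sorted s2.toList (fun x => x) false)) = true := by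
            simp only [bne_iff_ne, ne_eq]
            exact fun h => hnp (hsorted.mp h)
          rw [hs]
          simp
        | cons q d2 =>
          obtain ⟨c, e⟩ := q
          have hce : c ≠ e := pvMem_filter_zip_ne (p := (c, e)) (by rw [hdm]; simp)
          cases d2 with
          | nil =>
            -- exactly two mismatches: everything reduces to the cross condition
            have hpair : s1.toList.Perm s2.toList ↔ (a = e ∧ b = c) := by
              rw [hperm]
              show ((b ::ₘ e ::ₘ 0 : Multiset Char) = a ::ₘ c ::ₘ 0) ↔ _
              exact pvPair_multiset hab hce
            by_cases hp : s1.toList.Perm s2.toList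
            · have hs : ((PySem.List.sorted s1.toList (fun x => x) false)
                  != (PySem.List.sorted s2.toList (fun x => x) false)) = false := by
                simp only [bne_eq_false_iff_eq]
                exact hsorted.mpr hp
              rw [hs]
              obtain ⟨hae, hbc⟩ := hpair.mp hp
              simp [hae, hbc]
            · have hs : ((PySem.List.sorted s1.toList (fun x => x) false)
                  != (PySem.List.sorted s2.toList (fun x => x) false)) = true := by
                simp only [bne_iff_ne, ne_eq]
                exact fun h => hp (hsorted.mp h)
              rw [hs]
              have hnc : ¬ (a = e ∧ b = c) := fun hc => hp (hpair.mpr hc)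
              simp only [if_true]
              by_cases hae : a = e
              · have hbc : b ≠ c := fun h => hnc ⟨hae, h⟩
                simp [hae, hbc]
              · simp [hae]
          | cons r d3 =>
            -- three or more mismatches: both sides false
            have hcount : ((0 : Int) + ((((a, b) :: (c, e) :: r :: d3 :
                List (Char × Char)).length : Nat) : Int) == 2) = false := by
              simp only [List.length_cons, beq_eq_false_iff_ne, ne_eq]
              push_cast
              omega
            rw [hcount]
            split <;> simp
    · have hlb : (s1.toList.length != s2.toList.length) = true := by
        simp only [bne_iff_ne, ne_eq]; exact hlen
      rw [hlb]
      simp
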